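-- pv_equiv track=rewrite | github.com/KushATrivedi/Google-Foobar-Challenge-Solutions | 2.1.py | solution
-- ===== SOURCE A (Python) =====
-- def solution(s):
--     rc = lc = x = y = 0
--     for i in range(len(s)):
--         if(s[i] == '<'):
--             x = s[:i].count('>')
--             lc = lc+x
--         elif(s[i] == '>'):
--             y = s[i:].count('<')
--             rc = rc+y
--     return(rc+lc)
-- ===== SOURCE B (Python) =====
-- def solution(s):
--     gt = 0
--     total = 0
--     for c in s:
--         if c == '>':
--             gt += 1
--         elif c == '<':
--             total += 2 * gt
--     return total
-- ===== Notes on version B (the rewrite author's own statement) =====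
-- stated objective: faster
-- what changed: Replaced the index loop that recounts a prefix/suffix with str.count at every '<'/'>' by a single pass keeping a running count of '>' seen, adding 2*count at each '<'.
import Mathlib
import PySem

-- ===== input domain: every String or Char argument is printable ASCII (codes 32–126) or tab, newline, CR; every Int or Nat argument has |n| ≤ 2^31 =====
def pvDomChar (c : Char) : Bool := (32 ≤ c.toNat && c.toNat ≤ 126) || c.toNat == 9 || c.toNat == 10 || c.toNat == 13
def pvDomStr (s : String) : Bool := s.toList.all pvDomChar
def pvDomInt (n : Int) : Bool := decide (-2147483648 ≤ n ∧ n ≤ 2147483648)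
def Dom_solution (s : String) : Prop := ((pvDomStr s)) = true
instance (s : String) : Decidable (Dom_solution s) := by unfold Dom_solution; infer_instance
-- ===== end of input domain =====

-- B replaces A's quadratic loop (str.count over a prefix/suffix at every '<'/'>') by one pass
-- with a running count of '>' seen so far; objective: faster (asymptotic).

-- ===== PORT A =====
-- one loop step of A: on '<' recount '>' in s[:i]; on '>' recount '<' in s[i:]; state (rc, lc, x, y)
def solutionStep (s : String) (st : Int × Int × Int × Int) (i : Int) : Int × Int × Int × Int :=
  match st with
  | (rc, lc, x, y) =>
    match PySem.Str.pyGet? s i with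
    | none => (rc, lc, x, y)   -- unreachable: i ∈ range(len(s))
    | some c =>
      if c = '<' then
        let x : Int := (PySem.Str.count (PySem.Str.slice s none (some i)) ">" : Int)
        (rc, lc + x, x, y)
      else if c = '>' then
        let y : Int := (PySem.Str.count (PySem.Str.slice s (some i) none) "<" : Int)
        (rc + y, lc, x, y)
      else (rc, lc, x, y)

def solution (s : String) : Int :=
  match (PySem.List.pyRange 0 (PySem.Str.len s) 1).foldl (solutionStep s) (0, 0, 0, 0) with
  | (rc, lc, _, _) => rc + lc

-- ===== PORT B =====
-- one pass: gt = '>' seen so far; each '<' contributes 2*gt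
def solutionAltStep (st : Int × Int) (c : Char) : Int × Int :=
  match st with
  | (gt, total) =>
    if c = '>' then (gt + 1, total)
    else if c = '<' then (gt, total + 2 * gt)
    else (gt, total)

def solution_alt (s : String) : Int :=
  (s.toList.foldl solutionAltStep (0, 0)).2

-- ===== PRECONDITION & SPEC =====
def Spec_solution (s : String) (out : Int) : Prop := out = solution_alt s
instance (s : String) (out : Int) : Decidable (Spec_solution s out) := by unfold Spec_solution; infer_instance

-- ===== CLAIM (what is proved, stated in full; the proofs are below) =====
def Claim_equal_solution : Prop := ∀ (s : String), Dom_solution s → Spec_solution s (solution s)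

-- ===== LEMMAS AND PROOFS =====

-- number of ('>' before '<') crossing pairs, as an Int, by structural recursion
def cross : List Char → Int
  | [] => 0
  | c :: t => (if c = '>' then (t.count '<' : Int) else 0) + cross t

theorem count_go_singleton (c : Char) (cs : List Char) (fuel acc : Nat)
    (h : cs.length ≤ fuel) :
    PySem.Chars.count.go [c] fuel cs acc = acc + cs.count c := by
  induction cs generalizing fuel acc with
  | nil => cases fuel <;> simp [PySem.Chars.count.go]
  | cons x t ih =>
    cases fuel with
    | zero => simp at h
    | succ n =>
      simp only [List.length_cons, Nat.succ_le_succ_iff] at h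
      by_cases hx : x = c
      · subst hx
        simp [PySem.Chars.count.go, List.isPrefixOf, ih n (acc + 1) h]
        omega
      · simp [PySem.Chars.count.go, List.isPrefixOf, hx, ih n acc h,
          Ne.symm hx]

theorem count_singleton (c : Char) (cs : List Char) :
    PySem.Chars.count cs [c] = cs.count c := by
  simp [PySem.Chars.count, count_go_singleton c cs cs.length 0 le_rfl]

-- A's loop over indices pre.length .. (pre++suf).length, written as structural recursion on suf
def loopA (pre suf : List Char) (st : Int × Int × Int × Int) : Int × Int × Int × Int :=
  match suf, st with
  | [], st => st
  | c :: t, (rc, lc, x, y) =>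
    if c = '<' then
      loopA (pre ++ [c]) t (rc, lc + (pre.count '>' : Int), (pre.count '>' : Int), y)
    else if c = '>' then
      loopA (pre ++ [c]) t (rc + ((c :: t).count '<' : Int), lc, x, ((c :: t).count '<' : Int))
    else
      loopA (pre ++ [c]) t (rc, lc, x, y)

theorem foldl_eq_loopA (s : String) (pre suf : List Char) (h : s.toList = pre ++ suf)
    (st : Int × Int × Int × Int) :
    (PySem.List.pyRange (pre.length) (s.toList.length) 1).foldl (solutionStep s) st
      = loopA pre suf st := by
  induction suf generalizing pre st with
  | nil =>
    rw [PySem.List.pyRange_one_eq_nil (by simp [h])]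
    rfl
  | cons c t ih =>
    have hlt : (pre.length : Int) < s.toList.length := by
      simp [h]
    rw [PySem.List.pyRange_one_cons hlt]
    obtain ⟨rc, lc, x, y⟩ := st
    have hget : PySem.Str.pyGet? s (pre.length : Int) = some c := by
      simp [h]
    have hpref : (PySem.Str.slice s none (some (pre.length : Int))).toList = pre := by
      simp [h]
    have hsuf : (PySem.Str.slice s (some (pre.length : Int)) none).toList = c :: t := by
      simp [h]
    have hc1 : (PySem.Str.count (PySem.Str.slice s none (some (pre.length : Int))) ">")
        = pre.count '>' := by
      rw [PySem.Str.count_eq, hpref]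
      simpa using count_singleton '>' pre
    have hc2 : (PySem.Str.count (PySem.Str.slice s (some (pre.length : Int)) none) "<")
        = (c :: t).count '<' := by
      rw [PySem.Str.count_eq, hsuf]
      simpa using count_singleton '<' (c :: t)
    have hlen : ((pre ++ [c]).length : Int) = (pre.length : Int) + 1 := by simp
    by_cases h1 : c = '<'
    · simp only [List.foldl_cons, solutionStep, hget, h1, hc1]
      rw [← hlen, ih (pre ++ [c]) (by simp [h, h1]) _]
      simp [loopA, h1]
    · by_cases h2 : c = '>'
      · simp only [List.foldl_cons, solutionStep, hget, h2, hc2]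
        rw [← hlen, ih (pre ++ [c]) (by simp [h, h2]) _]
        simp [loopA, h2]
      · simp only [List.foldl_cons, solutionStep, hget, if_neg h1, if_neg h2]
        rw [← hlen, ih (pre ++ [c]) (by simp [h]) _]
        simp [loopA, h1, h2]

theorem loopA_value (pre suf : List Char) (rc lc x y : Int) :
    (loopA pre suf (rc, lc, x, y)).1 + (loopA pre suf (rc, lc, x, y)).2.1
      = rc + lc + (pre.count '>' : Int) * (suf.count '<' : Int) + 2 * cross suf := by
  induction suf generalizing pre rc lc x y with
  | nil => simp [loopA, cross]
  | cons c t ih =>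
    by_cases h1 : c = '<'
    · simp only [loopA, h1, reduceIte]
      rw [ih]
      simp [cross]
      ring
    · by_cases h2 : c = '>'
      · simp only [loopA, h2, reduceIte]
        rw [if_neg (show ¬('>' : Char) = '<' by decide)]
        rw [ih]
        simp [cross]
        ring
      · simp only [loopA, if_neg h1, if_neg h2]
        rw [ih]
        simp [h1, h2, cross]

theorem loopB_value (suf : List Char) (gt total : Int) :
    (suf.foldl solutionAltStep (gt, total)).2
      = total + 2 * gt * (suf.count '<' : Int) + 2 * cross suf := by
  induction suf generalizing gt total with
  | nil => simp [cross]
  | cons c t ih =>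
    by_cases h2 : c = '>'
    · simp only [List.foldl_cons, solutionAltStep, h2]
      rw [ih]
      simp [cross]
      ring
    · by_cases h1 : c = '<'
      · simp only [List.foldl_cons, solutionAltStep, h1]
        rw [ih]
        simp [cross]
        ring
      · simp only [List.foldl_cons, solutionAltStep, if_neg h2, if_neg h1]
        rw [ih]
        simp [h1, h2, cross]

-- ===== VERDICT (by name: the statement is the Claim_ definition above) =====
theorem solution_spec : Claim_equal_solution := by
  intro s _
  unfold Spec_solution
  have hB : solution_alt s = 2 * cross s.toList := by
    unfold solution_alt
    rw [loopB_value s.toList 0 0]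
    ring
  have hA : solution s = 2 * cross s.toList := by
    unfold solution
    have h0 : PySem.Str.len s = (s.toList.length : Int) := by simp [PySem.Str.len_eq]
    rw [h0]
    have h := foldl_eq_loopA s [] s.toList (by simp) (0, 0, 0, 0)
    simp only [List.length_nil, Nat.cast_zero] at h
    rw [h]
    have h2 := loopA_value [] s.toList 0 0 0 0
    rcases hL : loopA [] s.toList (0, 0, 0, 0) with ⟨rc, lc, x, y⟩
    rw [hL] at h2
    simp at h2
    simpa using h2
  rw [hA, hB]
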